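-- pv_equiv track=rewrite | github.com/Nicolas99-9/projet-Apprentissage | main.py | choose_initiale
-- ===== SOURCE A (Python) =====
-- NUMBER_CLASSES = 10
--
-- def choose_initiale(data, k , labels) :
--     list_initiale =  {}
--     for i in range(NUMBER_CLASSES):
--         list_initiale[i] = []
--     taille = len(data)
--     count = 0
--     while(count < k ):
--         i  = count
--         tmp = list(data[i])
--         label = labels[i]
--         list_initiale[label].append(tmp)
--         count += 1
--     return list_initiale
-- ===== SOURCE B (Python) =====
-- NUMBER_CLASSES = 10
--
-- def choose_initiale(data, k, labels):
--     # ten per-class filtering passes over the first k points, instead of one grouping pass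
--     return {c: [list(data[j]) for j in range(k) if labels[j] == c]
--             for c in range(NUMBER_CLASSES)}
-- ===== Notes on version B (the rewrite author's own statement) =====
-- stated objective: alternative
-- what changed: Replaced A's single while-loop grouping pass into a pre-initialised dict with a dict comprehension that makes one filtering pass over the first k points per class (ten passes total).
import Mathlib
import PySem

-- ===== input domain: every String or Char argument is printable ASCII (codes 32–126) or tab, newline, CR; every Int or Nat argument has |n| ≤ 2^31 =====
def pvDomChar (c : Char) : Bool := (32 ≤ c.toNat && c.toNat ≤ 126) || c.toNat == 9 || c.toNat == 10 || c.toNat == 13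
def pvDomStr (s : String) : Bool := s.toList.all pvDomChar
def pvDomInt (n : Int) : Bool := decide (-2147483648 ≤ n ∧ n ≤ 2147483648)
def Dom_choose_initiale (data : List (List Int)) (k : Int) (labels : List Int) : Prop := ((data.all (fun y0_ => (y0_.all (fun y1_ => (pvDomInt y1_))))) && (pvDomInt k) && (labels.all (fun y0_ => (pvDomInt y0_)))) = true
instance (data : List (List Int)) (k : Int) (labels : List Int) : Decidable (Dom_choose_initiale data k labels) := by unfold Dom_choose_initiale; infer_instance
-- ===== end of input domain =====

-- B replaces A's single grouping pass with ten per-class filtering passes (dict comprehension); same cost class, no speed claim.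

-- ===== PORT A =====
-- the 'while(count < k)' loop; fuel k.toNat is exactly the number of iterations
def chooseA_loop (data : List (List Int)) (k : Int) (labels : List Int) :
    Nat → Int → PySem.Dict Int (List (List Int)) → PySem.Dict Int (List (List Int))
  | 0, _, d => d
  | f + 1, count, d =>
    if count < k then
      let tmp := PySem.List.pyGetD data count []        -- list(data[i]); Pre_ keeps the index in range
      let label := PySem.List.pyGetD labels count 0     -- labels[i]
      chooseA_loop data k labels f (count + 1) (d.modify label [] (fun l => l ++ [tmp]))
    else d

def choose_initiale (data : List (List Int)) (k : Int) (labels : List Int) : List (Int × List (List Int)) :=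
  let list_initiale := (PySem.List.pyRange 0 10 1).foldl
      (fun d i => d.insert i ([] : List (List Int))) PySem.Dict.empty
  (chooseA_loop data k labels k.toNat 0 list_initiale).items

-- ===== PORT B =====
def choose_initiale_alt (data : List (List Int)) (k : Int) (labels : List Int) : List (Int × List (List Int)) :=
  (PySem.List.pyRange 0 10 1).map (fun c =>
    (c, (PySem.List.pyRange 0 k 1).foldl
          (fun acc j => if PySem.List.pyGetD labels j 0 == c
                        then acc ++ [PySem.List.pyGetD data j []] else acc) []))

-- ===== PRECONDITION & SPEC =====
-- Pre_ excludes exactly the inputs where A raises: IndexError when k exceeds len(data) or len(labels),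
-- and KeyError when one of the first k labels lies outside 0..9.
def Pre_choose_initiale (data : List (List Int)) (k : Int) (labels : List Int) : Prop :=
  k ≤ (data.length : Int) ∧ k ≤ (labels.length : Int) ∧
  ∀ l ∈ labels.take k.toNat, 0 ≤ l ∧ l < 10
instance (data : List (List Int)) (k : Int) (labels : List Int) : Decidable (Pre_choose_initiale data k labels) := by unfold Pre_choose_initiale; infer_instance
def pvWitness_choose_initiale : List (List Int) × Int × List Int := ([[1, 2], [3]], 2, [4, 4])

def Spec_choose_initiale (data : List (List Int)) (k : Int) (labels : List Int) (out : List (Int × List (List Int))) : Prop := out = choose_initiale_alt data k labels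
instance (data : List (List Int)) (k : Int) (labels : List Int) (out : List (Int × List (List Int))) : Decidable (Spec_choose_initiale data k labels out) := by unfold Spec_choose_initiale; infer_instance

-- ===== CLAIM (what is proved, stated in full; the proofs are below) =====
def Claim_equal_choose_initiale : Prop := ∀ (data : List (List Int)) (k : Int) (labels : List Int), Dom_choose_initiale data k labels → Pre_choose_initiale data k labels → Spec_choose_initiale data k labels (choose_initiale data k labels)

-- ===== LEMMAS AND PROOFS =====

-- A's while loop, given enough fuel, is a fold of the modify-step over range(count, k)
theorem chooseA_loop_eq_foldl (data : List (List Int)) (k : Int) (labels : List Int) :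
    ∀ (f : Nat) (m : Int) (d : PySem.Dict Int (List (List Int))), (k - m).toNat ≤ f →
      chooseA_loop data k labels f m d =
        (PySem.List.pyRange m k 1).foldl
          (fun d i => d.modify (PySem.List.pyGetD labels i 0) []
              (fun l => l ++ [PySem.List.pyGetD data i []])) d := by
  intro f
  induction f with
  | zero =>
      intro m d h
      have hk : k ≤ m := by omega
      rw [PySem.List.pyRange_one_eq_nil hk]
      rfl
  | succ f ih =>
      intro m d h
      by_cases hm : m < k
      · rw [PySem.List.pyRange_one_cons hm]
        simp only [chooseA_loop, if_pos hm, List.foldl_cons]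
        exact ih (m + 1) _ (by omega)
      · rw [PySem.List.pyRange_one_eq_nil (by omega)]
        simp [chooseA_loop, hm]

theorem d0_items :
    ((PySem.List.pyRange 0 10 1).foldl
        (fun d i => d.insert i ([] : List (List Int))) PySem.Dict.empty).items =
      (PySem.List.pyRange 0 10 1).map (fun i => (i, ([] : List (List Int)))) := by
  decide

theorem choose_initiale_spec' (data : List (List Int)) (k : Int) (labels : List Int)
    (hpre : Pre_choose_initiale data k labels) :
    choose_initiale data k labels = choose_initiale_alt data k labels := by
  obtain ⟨hd, hl, hlab⟩ := hpre
  set d0 := (PySem.List.pyRange 0 10 1).foldl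
      (fun d i => d.insert i ([] : List (List Int))) PySem.Dict.empty with hd0
  have hkeys0 : d0.keys = PySem.List.pyRange 0 10 1 := by decide
  have hnd0 : d0.keys.Nodup := by decide
  -- every label touched by the loop is in 0..9 (hence a key of d0)
  have hlabmem : ∀ i ∈ PySem.List.pyRange 0 k 1,
      PySem.List.pyGetD labels i 0 ∈ PySem.List.pyRange 0 10 1 := by
    intro i hi
    rw [PySem.List.mem_pyRange_one] at hi
    have hilen : i.toNat < labels.length := by omega
    have hget : PySem.List.pyGetD labels i 0 = labels[i.toNat] := by
      rw [PySem.List.pyGetD_eq_getElem labels 0 hi.1 (by omega)]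
    have htk : labels[i.toNat] ∈ labels.take k.toNat := by
      have hlen : i.toNat < (labels.take k.toNat).length := by
        simp only [List.length_take]
        omega
      have heq : (labels.take k.toNat)[i.toNat] = labels[i.toNat] := List.getElem_take
      exact heq ▸ List.getElem_mem hlen
    have := hlab _ htk
    rw [PySem.List.mem_pyRange_one, hget]
    omega
  -- rewrite A's loop as a fold over (label, row) pairs
  have hA : choose_initiale data k labels =
      (((PySem.List.pyRange 0 k 1).map
          (fun i => (PySem.List.pyGetD labels i 0, PySem.List.pyGetD data i []))).foldl
        (fun (d : PySem.Dict Int (List (List Int))) (p : Int × List Int) => d.modify p.1 [] (fun l => l ++ [p.2])) d0).items := by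
    show (chooseA_loop data k labels k.toNat 0 d0).items = _
    rw [chooseA_loop_eq_foldl data k labels k.toNat 0 d0 (by omega),
        List.foldl_map]
  set pairs := (PySem.List.pyRange 0 k 1).map
      (fun i => (PySem.List.pyGetD labels i 0, PySem.List.pyGetD data i [])) with hpairs
  set df := pairs.foldl (fun (d : PySem.Dict Int (List (List Int))) (p : Int × List Int) => d.modify p.1 [] (fun l => l ++ [p.2])) d0 with hdf
  have hndf : df.keys.Nodup := by
    rw [hdf]
    exact PySem.Dict.nodup_keys_foldl_modify_key pairs Prod.fst [] _ d0 hnd0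
  have hkeysf : df.keys = PySem.List.pyRange 0 10 1 := by
    rw [hdf]
    have := PySem.Dict.keys_foldl_modify_key (l := pairs) (key := Prod.fst)
      (d0 := ([] : List (List Int))) (f := fun _ p l => l ++ [p.2]) (d := d0)
    rw [this, hkeys0, PySem.Set.update_eq_append_filter]
    have hnil : (PySem.Set.ofList (pairs.map Prod.fst)).filter
        (fun y => !(PySem.Set.contains (PySem.List.pyRange 0 10 1) y)) = [] := by
      rw [List.filter_eq_nil_iff]
      intro a ha
      have ha' : a ∈ pairs.map Prod.fst := (PySem.Set.mem_ofList _ _).mp ha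
      rw [hpairs, List.map_map] at ha'
      obtain ⟨i, hi, rfl⟩ := List.mem_map.mp ha'
      simp only [Function.comp]
      have := hlabmem i hi
      simp [PySem.Set.contains, this]
    rw [hnil, List.append_nil]
  have hgetD : ∀ c ∈ PySem.List.pyRange 0 10 1,
      df.getD c [] = (pairs.filter (fun p => p.1 == c)).map (·.2) := by
    intro c hc
    rw [hdf, PySem.Dict.getD_foldl_modify_append]
    have h0 : d0.getD c [] = [] := by
      apply PySem.Dict.getD_of_mem_items (k := c) (v := ([] : List (List Int)))
      · rw [d0_items]
        exact List.mem_map.mpr ⟨c, hc, rfl⟩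
      · exact hnd0
    rw [h0, List.nil_append]
  -- assemble A's items, then match B
  rw [hA, PySem.Dict.items_eq_map_keys df hndf ([] : List (List Int)), hkeysf]
  unfold choose_initiale_alt
  apply List.map_congr_left
  intro c hc
  rw [hgetD c hc, PySem.List.foldl_append_if, List.nil_append, hpairs,
      List.filter_map, List.map_map]
  rfl

-- ===== VERDICT (by name: the statement is the Claim_ definition above) =====
theorem choose_initiale_spec : Claim_equal_choose_initiale := by
  intro data k labels _ hpre
  exact choose_initiale_spec' data k labels hpre
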